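-- pv_equiv track=rewrite | github.com/Touch2002/random_generator | insp.py | check_divisibility_by_4
-- ===== SOURCE A (Python) =====
-- def check_divisibility_by_4(a, m):
--     while True:
--         divisible_a = (a % 4 == 0)
--         divisible_b = (m % 4 == 0)
--         if (divisible_a and divisible_b) or (not divisible_a and not divisible_b):
--             return True, a
--         else:
--             a += 1
-- ===== SOURCE B (Python) =====
-- def check_divisibility_by_4(a, m):
--     if m % 4 == 0:
--         return True, a + (-a) % 4
--     return (True, a + 1) if a % 4 == 0 else (True, a)
-- ===== Notes on version B (the rewrite author's own statement) =====
-- stated objective: simpler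
-- what changed: Replaces the incrementing while-loop with a closed-form arithmetic computation: when m is divisible by 4, jump directly to the next multiple of 4 at or above a; otherwise bump a by 1 only if it is a multiple of 4.
import Mathlib
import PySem

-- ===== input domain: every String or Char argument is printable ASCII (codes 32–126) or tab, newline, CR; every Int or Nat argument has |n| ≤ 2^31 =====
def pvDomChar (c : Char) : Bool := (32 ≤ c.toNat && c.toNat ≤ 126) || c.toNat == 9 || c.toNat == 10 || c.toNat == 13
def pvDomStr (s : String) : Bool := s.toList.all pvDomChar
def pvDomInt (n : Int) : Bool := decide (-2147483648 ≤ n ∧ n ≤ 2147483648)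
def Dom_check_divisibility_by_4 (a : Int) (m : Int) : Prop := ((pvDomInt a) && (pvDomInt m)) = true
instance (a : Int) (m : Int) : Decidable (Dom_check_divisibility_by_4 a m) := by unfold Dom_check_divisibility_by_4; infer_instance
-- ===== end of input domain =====

-- ===== PORT A =====
-- Literal port of A's while-loop: each iteration checks the condition and
-- otherwise increments a; terminates since at most 3 increments are ever needed.
def check_divisibility_by_4 (a : Int) (m : Int) : Bool × Int :=
  let divisible_a := a % 4 == 0
  let divisible_b := m % 4 == 0
  if (divisible_a && divisible_b) || (!divisible_a && !divisible_b) then (true, a)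
  else check_divisibility_by_4 (a + 1) m
termination_by (if m % 4 == 0 then ((4 - a % 4) % 4).toNat else if a % 4 == 0 then 1 else 0)
decreasing_by
  rename_i h
  simp only [divisible_a, divisible_b, beq_iff_eq, Bool.and_eq_true, Bool.or_eq_true,
    Bool.not_eq_true', not_or, not_and] at h
  split_ifs <;> simp_all <;> omega

-- ===== PORT B =====
def check_divisibility_by_4_alt (a : Int) (m : Int) : Bool × Int :=
  if m % 4 == 0 then (true, a + (-a) % 4)
  else if a % 4 == 0 then (true, a + 1) else (true, a)

-- ===== PRECONDITION & SPEC =====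
def Spec_check_divisibility_by_4 (a : Int) (m : Int) (out : Bool × Int) : Prop := out = check_divisibility_by_4_alt a m
instance (a : Int) (m : Int) (out : Bool × Int) : Decidable (Spec_check_divisibility_by_4 a m out) := by unfold Spec_check_divisibility_by_4; infer_instance

-- ===== CLAIM (what is proved, stated in full; the proofs are below) =====
def Claim_equal_check_divisibility_by_4 : Prop := ∀ (a : Int) (m : Int), Dom_check_divisibility_by_4 a m → Spec_check_divisibility_by_4 a m (check_divisibility_by_4 a m)

-- ===== LEMMAS AND PROOFS =====

-- ===== VERDICT (by name: the statement is the Claim_ definition above) =====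
-- unfolding equation for the loop
theorem goA_eq (a m : Int) : check_divisibility_by_4 a m =
    (if ((a % 4 == 0) && (m % 4 == 0)) || (!(a % 4 == 0) && !(m % 4 == 0)) then (true, a)
     else check_divisibility_by_4 (a + 1) m) := by
  rw [check_divisibility_by_4]

theorem check_divisibility_by_4_spec : Claim_equal_check_divisibility_by_4 := by
  intro a m _
  unfold Spec_check_divisibility_by_4
  have h0 : 0 ≤ a % 4 := Int.emod_nonneg a (by norm_num)
  have h1 : a % 4 < 4 := Int.emod_lt_of_pos a (by norm_num)
  by_cases hm : m % 4 = 0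
  · -- target: next multiple of 4 at or above a
    interval_cases h : (a % 4)
    · rw [goA_eq]
      simp [check_divisibility_by_4_alt, hm, h, show (-a) % 4 = 0 by omega]
    · rw [goA_eq, goA_eq, goA_eq, goA_eq]
      simp [check_divisibility_by_4_alt, hm, h, show (a+1) % 4 = 2 by omega,
        show (a+1+1) % 4 = 3 by omega, show (a+1+1+1) % 4 = 0 by omega,
        show (-a) % 4 = 3 by omega]
      try omega
    · rw [goA_eq, goA_eq, goA_eq]
      simp [check_divisibility_by_4_alt, hm, h, show (a+1) % 4 = 3 by omega,
        show (a+1+1) % 4 = 0 by omega, show (-a) % 4 = 2 by omega]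
      try omega
    · rw [goA_eq, goA_eq]
      simp [check_divisibility_by_4_alt, hm, h, show (a+1) % 4 = 0 by omega,
        show (-a) % 4 = 1 by omega]
      try omega
  · by_cases ha : a % 4 = 0
    · rw [goA_eq, goA_eq]
      simp [check_divisibility_by_4_alt, hm, ha, show (a+1) % 4 = 1 by omega]
    · rw [goA_eq]
      simp [check_divisibility_by_4_alt, hm, ha]
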